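-- pv_equiv track=rewrite | github.com/jraymondli/usaco-1 | 2020/wordprocessor_jan20_bronze/wordprocess.py | follow_through
-- ===== SOURCE A (Python) =====
-- def len_str(lin):
--     num = 0
--     for n in list(lin):
--         if n != " ":
--             num += 1
--     return num
--
-- def follow_through(args):
--     line = args[1]
--     k = args[0]
--     new_line = []
--     temp_sub_line = ""
--     for l in line:
--         if len_str(temp_sub_line+l) <= int(k):
--             if temp_sub_line:
--                 temp_sub_line = temp_sub_line+" "+l
--             else:
--                 temp_sub_line = temp_sub_line + l
--         else:
--             new_line.append(temp_sub_line)
--             temp_sub_line = ""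
--             temp_sub_line = temp_sub_line+l
--     if temp_sub_line:
--         new_line.append(temp_sub_line)
--     return new_line
-- ===== SOURCE B (Python) =====
-- def follow_through(args):
--     k = args[0]
--     words = args[1]
--     out = []
--     cur = ""
--     cnt = 0  # non-space characters in cur (kept incrementally, no rescans)
--     for w in words:
--         ns = sum(1 for c in w if c != " ")
--         if cnt + ns <= k:
--             cur = cur + " " + w if cur else w
--             cnt += ns
--         else:
--             out.append(cur)
--             cur, cnt = w, ns
--     if cur:
--         out.append(cur)
--     return out
-- ===== Notes on version B (the rewrite author's own statement) =====
-- stated objective: faster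
-- what changed: B keeps a running count of the non-space characters of the current line and each word's count computed once, instead of re-scanning the whole accumulated line (len_str(temp+word)) at every word.
import Mathlib
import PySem

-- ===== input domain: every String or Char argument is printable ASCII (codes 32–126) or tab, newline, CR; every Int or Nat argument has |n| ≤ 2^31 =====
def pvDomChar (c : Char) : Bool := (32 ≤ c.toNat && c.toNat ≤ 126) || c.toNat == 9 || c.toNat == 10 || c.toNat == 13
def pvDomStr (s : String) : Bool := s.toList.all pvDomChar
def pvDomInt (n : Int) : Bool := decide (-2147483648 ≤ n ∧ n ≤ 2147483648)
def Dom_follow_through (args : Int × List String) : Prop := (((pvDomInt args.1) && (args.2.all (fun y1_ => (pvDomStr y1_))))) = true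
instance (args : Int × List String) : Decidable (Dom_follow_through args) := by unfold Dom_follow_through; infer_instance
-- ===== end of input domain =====

-- B replaces A's per-word rescan of the whole accumulated line (len_str(temp+word)) by an
-- incrementally maintained non-space character count: asymptotically faster, same results.

-- ===== PORT A =====
-- Python strings are ported as List Char (PySem's exact representation); outputs use String.mk.
def len_str (lin : List Char) : Int :=
  lin.foldl (fun num n => if n ≠ ' ' then num + 1 else num) 0

def follow_through (args : Int × List String) : List String :=
  let k := args.1
  let st := args.2.foldl (fun (st : List (List Char) × List Char) (l : String) =>
      if len_str (st.2 ++ l.toList) ≤ k then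
        if st.2 ≠ [] then (st.1, st.2 ++ [' '] ++ l.toList) else (st.1, st.2 ++ l.toList)
      else (st.1 ++ [st.2], l.toList)) ([], [])
  (if st.2 ≠ [] then st.1 ++ [st.2] else st.1).map String.mk

-- ===== PORT B =====
def follow_through_alt (args : Int × List String) : List String :=
  let k := args.1
  let st := args.2.foldl (fun (st : List (List Char) × List Char × Int) (w : String) =>
      let ns : Int := w.toList.countP (fun c => c ≠ ' ')
      if st.2.2 + ns ≤ k then
        (st.1, (if st.2.1 ≠ [] then st.2.1 ++ [' '] ++ w.toList else w.toList), st.2.2 + ns)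
      else (st.1 ++ [st.2.1], w.toList, ns)) ([], [], (0 : Int))
  (if st.2.1 ≠ [] then st.1 ++ [st.2.1] else st.1).map String.mk

-- ===== PRECONDITION & SPEC =====
def Spec_follow_through (args : Int × List String) (out : List String) : Prop := out = follow_through_alt args
instance (args : Int × List String) (out : List String) : Decidable (Spec_follow_through args out) := by unfold Spec_follow_through; infer_instance

-- ===== CLAIM (what is proved, stated in full; the proofs are below) =====
def Claim_equal_follow_through : Prop := ∀ (args : Int × List String), Dom_follow_through args → Spec_follow_through args (follow_through args)

-- ===== LEMMAS AND PROOFS =====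

theorem len_str_eq_countP (l : List Char) :
    len_str l = (l.countP (fun c => c ≠ ' ') : Int) := by
  unfold len_str
  simpa using PySem.List.foldl_if_add_one (fun c => decide (c ≠ ' ')) l 0

theorem len_str_append (a b : List Char) :
    len_str (a ++ b) = len_str a + len_str b := by
  simp [len_str_eq_countP, List.countP_append]

theorem loop_inv (k : Int) (ws : List String) (nl : List (List Char)) (temp : List Char) :
    ws.foldl (fun (st : List (List Char) × List Char × Int) (w : String) =>
      if st.2.2 + (w.toList.countP (fun c => c ≠ ' ') : Int) ≤ k then
        (st.1, (if st.2.1 ≠ [] then st.2.1 ++ [' '] ++ w.toList else w.toList),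
          st.2.2 + (w.toList.countP (fun c => c ≠ ' ') : Int))
      else (st.1 ++ [st.2.1], w.toList, (w.toList.countP (fun c => c ≠ ' ') : Int)))
      (nl, temp, len_str temp)
    =
    ((ws.foldl (fun (st : List (List Char) × List Char) (l : String) =>
      if len_str (st.2 ++ l.toList) ≤ k then
        if st.2 ≠ [] then (st.1, st.2 ++ [' '] ++ l.toList) else (st.1, st.2 ++ l.toList)
      else (st.1 ++ [st.2], l.toList)) (nl, temp)).1,
     (ws.foldl (fun (st : List (List Char) × List Char) (l : String) =>
      if len_str (st.2 ++ l.toList) ≤ k then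
        if st.2 ≠ [] then (st.1, st.2 ++ [' '] ++ l.toList) else (st.1, st.2 ++ l.toList)
      else (st.1 ++ [st.2], l.toList)) (nl, temp)).2,
     len_str ((ws.foldl (fun (st : List (List Char) × List Char) (l : String) =>
      if len_str (st.2 ++ l.toList) ≤ k then
        if st.2 ≠ [] then (st.1, st.2 ++ [' '] ++ l.toList) else (st.1, st.2 ++ l.toList)
      else (st.1 ++ [st.2], l.toList)) (nl, temp)).2)) := by
  induction ws generalizing nl temp with
  | nil => simp
  | cons w ws ih =>
    simp only [List.foldl_cons]
    have hcond : (len_str temp + (w.toList.countP (fun c => c ≠ ' ') : Int) ≤ k)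
        ↔ (len_str (temp ++ w.toList) ≤ k) := by
      rw [len_str_append, len_str_eq_countP w.toList]
    by_cases h : len_str (temp ++ w.toList) ≤ k
    · rw [if_pos (hcond.mpr h), if_pos h]
      by_cases ht : temp = []
      · subst ht
        rw [if_neg (show ¬(([] : List Char) ≠ []) from by simp),
            if_neg (show ¬(([] : List Char) ≠ []) from by simp)]
        have h0 : len_str ([] : List Char) + (w.toList.countP (fun c => c ≠ ' ') : Int)
            = len_str ([] ++ w.toList) := by
          rw [len_str_append, len_str_eq_countP w.toList]
        rw [h0]
        exact ih nl ([] ++ w.toList)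
      · have hne : temp ≠ [] := ht
        rw [if_pos hne, if_pos hne]
        have h1 : len_str temp + (w.toList.countP (fun c => c ≠ ' ') : Int)
            = len_str (temp ++ [' '] ++ w.toList) := by
          rw [len_str_append, len_str_append, len_str_eq_countP w.toList,
            show len_str [' '] = 0 from rfl]
          ring
        rw [h1]
        exact ih nl (temp ++ [' '] ++ w.toList)
    · rw [if_neg (fun hc => h (hcond.mp hc)), if_neg h]
      rw [show (w.toList.countP (fun c => c ≠ ' ') : Int) = len_str w.toList from
        (len_str_eq_countP w.toList).symm]
      exact ih (nl ++ [temp]) w.toList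

-- ===== VERDICT (by name: the statement is the Claim_ definition above) =====
theorem follow_through_spec : Claim_equal_follow_through := by
  intro args _
  have h := loop_inv args.1 args.2 [] []
  exact (congrArg (fun st : List (List Char) × List Char × Int =>
    (if st.2.1 ≠ [] then st.1 ++ [st.2.1] else st.1).map String.mk) h).symm
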